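-- pv_equiv track=rewrite | github.com/tosoba/Grind | intro_to_algorithms/chapter_15/rod_cut.py | rod_cut_with_cut_price
-- ===== SOURCE A (Python) =====
-- from typing import List
--
-- def rod_cut_with_cut_price(prices: List[int], length: int, cut_price: int) -> int:
--     assert prices and 1 <= length <= len(prices)
--     if length == 1:
--         return prices[0]
--
--     memo: List[int] = [-1] * length
--     memo[0] = prices[0]
--
--     def rod_cut(current_length: int) -> int:
--         if memo[current_length - 1] != -1:
--             return memo[current_length - 1]
--         revenues = [prices[current_length - 1]]
--         for i in range(current_length - 2, -1, -1):
--             revenues.append(rod_cut(current_length=i + 1) + prices[current_length - 2 - i] - cut_price)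
--         max_revenue = max(revenues)
--         memo[current_length - 1] = max_revenue
--         return max_revenue
--
--     return rod_cut(length)
-- ===== SOURCE B (Python) =====
-- from typing import List
--
-- def rod_cut_with_cut_price(prices: List[int], length: int, cut_price: int) -> int:
--     assert prices and 1 <= length <= len(prices)
--     best = [prices[0]]
--     for L in range(2, length + 1):
--         b = prices[L - 1]
--         for j in range(1, L):
--             b = max(b, best[j - 1] + prices[L - 1 - j] - cut_price)
--         best.append(b)
--     return best[length - 1]
-- ===== Notes on version B (the rewrite author's own statement) =====
-- stated objective: simpler
-- what changed: Replaced the top-down memoized recursion (nested closure, -1 sentinel memo, recursive calls per subproblem) with a single bottom-up loop that tabulates the best revenue for each length from 1 to `length`.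
import Mathlib
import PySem

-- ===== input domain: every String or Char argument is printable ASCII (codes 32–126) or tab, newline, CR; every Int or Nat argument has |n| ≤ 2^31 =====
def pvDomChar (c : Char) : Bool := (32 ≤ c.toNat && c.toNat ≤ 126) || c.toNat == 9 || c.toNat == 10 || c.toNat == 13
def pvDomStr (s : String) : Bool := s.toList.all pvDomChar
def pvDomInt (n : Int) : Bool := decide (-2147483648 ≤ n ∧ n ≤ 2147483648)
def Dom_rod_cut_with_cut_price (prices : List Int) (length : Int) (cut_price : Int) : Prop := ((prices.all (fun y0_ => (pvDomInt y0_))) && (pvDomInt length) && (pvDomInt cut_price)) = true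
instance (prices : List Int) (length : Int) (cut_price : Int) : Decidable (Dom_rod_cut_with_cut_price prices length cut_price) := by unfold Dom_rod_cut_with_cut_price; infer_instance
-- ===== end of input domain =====

-- B replaces A's top-down memoized recursion by bottom-up tabulation over increasing rod lengths (objective: simpler, no recursion/memo-sentinel machinery).


-- ===== PORT A =====
-- inner memoized recursion `rod_cut(current_length)`; the memo list is threaded as state.
-- Termination: every recursive call has a strictly smaller current_length (attach supplies the bound).
def rodA (prices : List Int) (cut_price : Int) : Nat → List Int → Int × List Int
  | cl, memo =>
    let m := (PySem.List.pyGet? memo ((cl : Int) - 1)).getD 0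
    if m ≠ -1 then (m, memo)
    else
      -- revenues starts as [prices[cl-1]]; the loop appends rod_cut(i+1) + prices[cl-2-i] - cut_price
      -- for i = cl-2 .. 0, i.e. j = i+1 = cl-1 .. 1.
      let r := (((List.range' 1 (cl - 1)).reverse).attach).foldl
        (fun (acc : List Int × List Int) jh =>
          let q := rodA prices cut_price jh.1 acc.2
          (acc.1 ++ [q.1 + (PySem.List.pyGet? prices ((cl : Int) - 1 - (jh.1 : Int))).getD 0 - cut_price], q.2))
        ([(PySem.List.pyGet? prices ((cl : Int) - 1)).getD 0], memo)
      let mx := (PySem.List.max? r.1 (fun y => y)).getD 0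
      (mx, r.2.set (cl - 1) mx)
termination_by cl => cl
decreasing_by
  have h := jh.2
  simp only [List.mem_reverse, List.mem_range'_1] at h
  omega

def rod_cut_with_cut_price (prices : List Int) (length : Int) (cut_price : Int) : Int :=
  if length = 1 then (PySem.List.pyGet? prices 0).getD 0
  else
    let memo := (List.replicate length.toNat (-1 : Int)).set 0 ((PySem.List.pyGet? prices 0).getD 0)
    (rodA prices cut_price length.toNat memo).1

-- ===== PORT B =====
-- best revenue for a rod of length L, given best[k] = best revenue for length k+1 (k < L-1)
def pvInner (prices : List Int) (cut_price : Int) (best : List Int) (L : Nat) : Int :=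
  (List.range' 1 (L - 1)).foldl
    (fun b j => max b (best.getD (j - 1) 0 + prices.getD (L - 1 - j) 0 - cut_price))
    (prices.getD (L - 1) 0)

-- the table `best` after the outer loop `for L in range(2, n+1)`
def bTable (prices : List Int) (cut_price : Int) (n : Nat) : List Int :=
  (List.range' 2 (n - 1)).foldl
    (fun best L => best ++ [pvInner prices cut_price best L])
    [prices.getD 0 0]

def rod_cut_with_cut_price_alt (prices : List Int) (length : Int) (cut_price : Int) : Int :=
  (bTable prices cut_price length.toNat).getD (length.toNat - 1) 0

-- ===== PRECONDITION & SPEC =====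
-- Pre_ = exactly the inputs on which A's `assert prices and 1 <= length <= len(prices)` passes
-- (elsewhere A raises AssertionError).
def Pre_rod_cut_with_cut_price (prices : List Int) (length : Int) (cut_price : Int) : Prop :=
  1 ≤ length ∧ length ≤ (prices.length : Int)
instance (prices : List Int) (length : Int) (cut_price : Int) : Decidable (Pre_rod_cut_with_cut_price prices length cut_price) := by unfold Pre_rod_cut_with_cut_price; infer_instance

def pvWitness_rod_cut_with_cut_price : List Int × Int × Int := ([1, 5, 8, 9], 4, 1)

def Spec_rod_cut_with_cut_price (prices : List Int) (length : Int) (cut_price : Int) (out : Int) : Prop := out = rod_cut_with_cut_price_alt prices length cut_price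
instance (prices : List Int) (length : Int) (cut_price : Int) (out : Int) : Decidable (Spec_rod_cut_with_cut_price prices length cut_price out) := by unfold Spec_rod_cut_with_cut_price; infer_instance

-- ===== CLAIM (what is proved, stated in full; the proofs are below) =====
def Claim_equal_rod_cut_with_cut_price : Prop := ∀ (prices : List Int) (length : Int) (cut_price : Int), Dom_rod_cut_with_cut_price prices length cut_price → Pre_rod_cut_with_cut_price prices length cut_price → Spec_rod_cut_with_cut_price prices length cut_price (rod_cut_with_cut_price prices length cut_price)

-- ===== LEMMAS AND PROOFS =====

lemma pvFoldlMaxSwap (l : List Int) (a b : Int) :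
    List.foldl max (max a b) l = max (List.foldl max a l) b := by
  induction l generalizing a with
  | nil => rfl
  | cons x t ih =>
    simp only [List.foldl_cons]
    rw [max_right_comm a b x, ih]

lemma pvFoldlMaxReverse (l : List Int) (a : Int) :
    List.foldl max a l.reverse = List.foldl max a l := by
  induction l generalizing a with
  | nil => rfl
  | cons x t ih =>
    simp only [List.reverse_cons, List.foldl_append, List.foldl_cons, List.foldl_nil]
    rw [ih, ← pvFoldlMaxSwap, max_comm a x]

lemma bTable_zero (prices : List Int) (cut_price : Int) :
    bTable prices cut_price 0 = [prices.getD 0 0] := rfl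

lemma bTable_one (prices : List Int) (cut_price : Int) :
    bTable prices cut_price 1 = [prices.getD 0 0] := rfl

lemma bTable_succ (prices : List Int) (cut_price : Int) (m : Nat) (hm : 1 ≤ m) :
    bTable prices cut_price (m + 1)
      = bTable prices cut_price m ++ [pvInner prices cut_price (bTable prices cut_price m) (m + 1)] := by
  unfold bTable
  have h1 : (m + 1) - 1 = (m - 1) + 1 := by omega
  have h2 : 2 + 1 * (m - 1) = m + 1 := by omega
  rw [h1, List.range'_concat, h2, List.foldl_append, List.foldl_cons, List.foldl_nil]

lemma bTable_length (prices : List Int) (cut_price : Int) (n : Nat) :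
    (bTable prices cut_price n).length = (n - 1) + 1 := by
  induction n with
  | zero => rfl
  | succ m ih =>
    rcases Nat.eq_zero_or_pos m with hm | hm
    · subst hm; rfl
    · rw [bTable_succ prices cut_price m hm, List.length_append, ih]
      simp; omega

lemma bTable_prefix (prices : List Int) (cut_price : Int) (k n : Nat) (hk : k ≤ n) :
    ∃ rest, bTable prices cut_price n = bTable prices cut_price k ++ rest := by
  induction n with
  | zero =>
    have : k = 0 := by omega
    exact ⟨[], by simp [this]⟩
  | succ m ih =>
    rcases Nat.lt_or_ge k (m + 1) with hlt | hge
    · obtain ⟨rest, hr⟩ := ih (by omega)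
      rcases Nat.eq_zero_or_pos m with hm | hm
      · have hk0 : k = 0 := by omega
        refine ⟨[], ?_⟩
        subst hm; subst hk0
        rw [bTable_one, bTable_zero, List.append_nil]
      · exact ⟨rest ++ [pvInner prices cut_price (bTable prices cut_price m) (m + 1)],
          by rw [bTable_succ prices cut_price m hm, hr, List.append_assoc]⟩
    · have : k = m + 1 := by omega
      exact ⟨[], by simp [this]⟩

lemma bTable_getD_prefix (prices : List Int) (cut_price : Int) (k n i : Nat)
    (hk : k ≤ n) (hi : i < (bTable prices cut_price k).length) :
    (bTable prices cut_price n).getD i 0 = (bTable prices cut_price k).getD i 0 := by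
  obtain ⟨rest, hr⟩ := bTable_prefix prices cut_price k n hk
  rw [hr, List.getD_eq_getElem?_getD, List.getElem?_append_left hi, ← List.getD_eq_getElem?_getD]

lemma bTable_getD_zero (prices : List Int) (cut_price : Int) (n : Nat) :
    (bTable prices cut_price n).getD 0 0 = prices.getD 0 0 := by
  rw [bTable_getD_prefix prices cut_price 0 n 0 (by omega) (by simp [bTable_zero])]
  rfl

lemma pvInner_congr (prices : List Int) (cut_price : Int) (b b' : List Int) (L : Nat)
    (h : ∀ k, k < L - 1 → b.getD k 0 = b'.getD k 0) :
    pvInner prices cut_price b L = pvInner prices cut_price b' L := by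
  unfold pvInner
  apply PySem.List.foldl_congr_mem
  intro acc j hj
  have hj' := List.mem_range'_1.mp hj
  rw [h (j - 1) (by omega)]

lemma bTable_rec (prices : List Int) (cut_price : Int) (n L : Nat) (h2 : 2 ≤ L) (hLn : L ≤ n) :
    (bTable prices cut_price n).getD (L - 1) 0
      = pvInner prices cut_price (bTable prices cut_price n) L := by
  have hmsucc : (L - 1) + 1 = L := by omega
  have hsucc := bTable_succ prices cut_price (L - 1) (by omega)
  rw [hmsucc] at hsucc
  have hlen1 : (bTable prices cut_price (L - 1)).length = L - 1 := by
    rw [bTable_length]; omega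
  have e1 : (bTable prices cut_price L).getD (L - 1) 0
      = pvInner prices cut_price (bTable prices cut_price (L - 1)) L := by
    rw [hsucc, List.getD_eq_getElem?_getD, List.getElem?_append_right (by omega)]
    simp [hlen1]
  have e2 : (bTable prices cut_price n).getD (L - 1) 0
      = (bTable prices cut_price L).getD (L - 1) 0 := by
    apply bTable_getD_prefix prices cut_price L n (L - 1) hLn
    rw [bTable_length]; omega
  have e3 : pvInner prices cut_price (bTable prices cut_price (L - 1)) L
      = pvInner prices cut_price (bTable prices cut_price n) L := by
    apply pvInner_congr
    intro k hk
    exact (bTable_getD_prefix prices cut_price (L - 1) n k (by omega) (by omega)).symm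
  rw [e2, e1, e3]

-- A-side invariant: the memo has length n and each cell is the sentinel -1 or the table value.
def pvInv (prices : List Int) (cut_price : Int) (n : Nat) (memo : List Int) : Prop :=
  memo.length = n ∧
  ∀ k, k < n → memo.getD k 0 = -1 ∨ memo.getD k 0 = (bTable prices cut_price n).getD k 0

lemma rodA_eq (prices : List Int) (cut_price : Int) (cl : Nat) (memo : List Int) :
    rodA prices cut_price cl memo =
      if (PySem.List.pyGet? memo ((cl : Int) - 1)).getD 0 ≠ -1 then
        ((PySem.List.pyGet? memo ((cl : Int) - 1)).getD 0, memo)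
      else
        let r := ((List.range' 1 (cl - 1)).reverse).foldl
          (fun (acc : List Int × List Int) j =>
            let q := rodA prices cut_price j acc.2
            (acc.1 ++ [q.1 + (PySem.List.pyGet? prices ((cl : Int) - 1 - (j : Int))).getD 0 - cut_price], q.2))
          ([(PySem.List.pyGet? prices ((cl : Int) - 1)).getD 0], memo)
        let mx := (PySem.List.max? r.1 (fun y => y)).getD 0
        (mx, r.2.set (cl - 1) mx) := by
  have h := List.foldl_attach
    (l := (List.range' 1 (cl - 1)).reverse)
    (f := fun (acc : List Int × List Int) j =>
      let q := rodA prices cut_price j acc.2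
      (acc.1 ++ [q.1 + (PySem.List.pyGet? prices ((cl : Int) - 1 - (j : Int))).getD 0 - cut_price], q.2))
    (b := ([(PySem.List.pyGet? prices ((cl : Int) - 1)).getD 0], memo))
  rw [rodA]
  simp only [h]

lemma rodA_loop_spec (prices : List Int) (cut_price : Int) (n cl : Nat)
    (IH : ∀ j, 1 ≤ j → j < cl → ∀ memo, pvInv prices cut_price n memo →
        (rodA prices cut_price j memo).1 = (bTable prices cut_price n).getD (j - 1) 0 ∧
        pvInv prices cut_price n (rodA prices cut_price j memo).2) :
    ∀ (l : List Nat), (∀ j ∈ l, 1 ≤ j ∧ j < cl) → ∀ (acc memo : List Int),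
      pvInv prices cut_price n memo →
      (List.foldl (fun (acc : List Int × List Int) (j : Nat) =>
          let q := rodA prices cut_price j acc.2
          (acc.1 ++ [q.1 + (PySem.List.pyGet? prices ((cl : Int) - 1 - (j : Int))).getD 0 - cut_price], q.2))
        (acc, memo) l).1
        = acc ++ l.map (fun j => (bTable prices cut_price n).getD (j - 1) 0
              + (PySem.List.pyGet? prices ((cl : Int) - 1 - (j : Int))).getD 0 - cut_price) ∧
      pvInv prices cut_price n
        (List.foldl (fun (acc : List Int × List Int) (j : Nat) =>
          let q := rodA prices cut_price j acc.2
          (acc.1 ++ [q.1 + (PySem.List.pyGet? prices ((cl : Int) - 1 - (j : Int))).getD 0 - cut_price], q.2))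
        (acc, memo) l).2 := by
  intro l
  induction l with
  | nil => intro _ acc memo hinv; simpa using hinv
  | cons j t ih =>
    intro hmem acc memo hinv
    obtain ⟨hj1, hjcl⟩ := hmem j (List.mem_cons_self)
    have hq := IH j hj1 hjcl memo hinv
    simp only [List.foldl_cons]
    have := ih (fun x hx => hmem x (List.mem_cons_of_mem j hx))
      (acc ++ [(rodA prices cut_price j memo).1
        + (PySem.List.pyGet? prices ((cl : Int) - 1 - (j : Int))).getD 0 - cut_price])
      (rodA prices cut_price j memo).2 hq.2
    refine ⟨?_, this.2⟩
    rw [this.1, hq.1]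
    simp

lemma rodA_spec (prices : List Int) (cut_price : Int) (n : Nat) :
    ∀ cl, 1 ≤ cl → cl ≤ n → ∀ memo, pvInv prices cut_price n memo →
      (rodA prices cut_price cl memo).1 = (bTable prices cut_price n).getD (cl - 1) 0 ∧
      pvInv prices cut_price n (rodA prices cut_price cl memo).2 := by
  intro cl
  induction cl using Nat.strong_induction_on with
  | _ cl IH =>
    intro h1 h2 memo hinv
    rw [rodA_eq]
    have hcast : ((cl : Int) - 1) = ((cl - 1 : Nat) : Int) := by omega
    have hm : (PySem.List.pyGet? memo ((cl : Int) - 1)).getD 0 = memo.getD (cl - 1) 0 := by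
      rw [hcast, PySem.List.pyGet?_natCast, ← List.getD_eq_getElem?_getD]
    simp only [hm]
    split_ifs with hif
    · -- memoized value
      rcases hinv.2 (cl - 1) (by omega) with hv | hv
      · exact absurd hv hif
      · exact ⟨hv, hinv⟩
    · -- recompute
      have hloop := rodA_loop_spec prices cut_price n cl
        (fun j hj1 hjcl memo' hinv' => IH j hjcl hj1 (by omega) memo' hinv')
        ((List.range' 1 (cl - 1)).reverse)
        (by intro j hj; simp only [List.mem_reverse, List.mem_range'_1] at hj; omega)
        [(PySem.List.pyGet? prices ((cl : Int) - 1)).getD 0] memo hinv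
      have hr0 : (PySem.List.pyGet? prices ((cl : Int) - 1)).getD 0 = prices.getD (cl - 1) 0 := by
        rw [hcast, PySem.List.pyGet?_natCast, ← List.getD_eq_getElem?_getD]
      -- the computed maximum equals the table entry
      have hmax : (PySem.List.max? (List.foldl (fun (acc : List Int × List Int) (j : Nat) =>
            let q := rodA prices cut_price j acc.2
            (acc.1 ++ [q.1 + (PySem.List.pyGet? prices ((cl : Int) - 1 - (j : Int))).getD 0 - cut_price], q.2))
          ([(PySem.List.pyGet? prices ((cl : Int) - 1)).getD 0], memo)
          ((List.range' 1 (cl - 1)).reverse)).1 (fun y => y)).getD 0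
          = (bTable prices cut_price n).getD (cl - 1) 0 := by
        rw [hloop.1]
        rw [List.singleton_append, PySem.List.max?_id_cons, Option.getD_some]
        rw [List.map_reverse, pvFoldlMaxReverse, List.foldl_map, hr0]
        rcases Nat.lt_or_ge cl 2 with hcl2 | hcl2
        · -- cl = 1: no cut positions, the maximum is prices[0]
          have : cl = 1 := by omega
          subst this
          simpa using (bTable_getD_zero prices cut_price n).symm
        · rw [bTable_rec prices cut_price n cl hcl2 h2]
          unfold pvInner
          apply PySem.List.foldl_congr_mem
          intro acc j hj
          have hj' := List.mem_range'_1.mp hj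
          have hc2 : ((cl : Int) - 1 - (j : Int)) = ((cl - 1 - j : Nat) : Int) := by omega
          rw [hc2, PySem.List.pyGet?_natCast, ← List.getD_eq_getElem?_getD]
      refine ⟨hmax, ?_, ?_⟩
      · rw [List.length_set, hloop.2.1]
      · intro k hk
        rcases eq_or_ne k (cl - 1) with he | hne
        · subst he
          right
          rw [List.getD_eq_getElem?_getD,
            List.getElem?_set_self (by rw [hloop.2.1]; omega), Option.getD_some, hmax]
        · rw [List.getD_eq_getElem?_getD, List.getElem?_set_ne (by omega),
            ← List.getD_eq_getElem?_getD]
          exact hloop.2.2 k hk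

-- ===== VERDICT (by name: the statement is the Claim_ definition above) =====
theorem rod_cut_with_cut_price_spec : Claim_equal_rod_cut_with_cut_price := by
  unfold Claim_equal_rod_cut_with_cut_price Spec_rod_cut_with_cut_price
  intro prices len cut_price _ hpre
  obtain ⟨h1, h2⟩ := hpre
  unfold rod_cut_with_cut_price rod_cut_with_cut_price_alt
  split_ifs with hL
  · -- length == 1
    subst hL
    rw [PySem.List.pyGet?_zero, ← List.getD_eq_getElem?_getD]
    simp only [Int.toNat_one]
    rw [bTable_one]
    rfl
  · have hn2 : 2 ≤ len.toNat := by omega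
    have hinv : pvInv prices cut_price len.toNat
        ((List.replicate len.toNat (-1 : Int)).set 0 ((PySem.List.pyGet? prices 0).getD 0)) := by
      constructor
      · simp
      · intro k hk
        rcases eq_or_ne k 0 with he | hne
        · subst he
          right
          rw [List.getD_eq_getElem?_getD,
            List.getElem?_set_self (by simp; omega), Option.getD_some,
            PySem.List.pyGet?_zero, ← List.getD_eq_getElem?_getD,
            bTable_getD_zero]
        · left
          rw [List.getD_eq_getElem?_getD, List.getElem?_set_ne (by omega),
            List.getElem?_replicate, if_pos hk, Option.getD_some]
    exact (rodA_spec prices cut_price len.toNat len.toNat (by omega) (by omega) _ hinv).1
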